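-- pv_equiv track=rewrite | github.com/Sarath191181208/test3 | experiments/main.py | pick_items_with_mask
-- ===== SOURCE A (Python) =====
-- from typing import List, Tuple
--
-- def pick_items_with_mask(groups: List[List[str]], iteration: int) -> Tuple[List[str], int]:
--     """
--     Selects a unique combination of items from a list of lists based on an iteration index.
--
--     - Each sublist contributes one item, determined by a binary mask.
--     - Supports groups with varying numbers of values.
--
--     Args:
--         groups (List[List[str]]): A list of lists containing items.
--         iteration (int): The current iteration index (0 to total unique combinations - 1).
--
--     Returns:
--         Tuple[List[str], int]: The selected combination and the binmask used.
--     """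
--     selected_items = []
--     binmask = iteration  # The binary mask will be used to determine selections
--
--     for group in groups:
--         num_options = len(group)
--         selected_index = binmask % num_options  # Pick an index based on mask
--         selected_items.append(group[selected_index])
--         binmask //= num_options  # Shift mask to next group
--
--     return selected_items, iteration  # The mask remains the same
-- ===== SOURCE B (Python) =====
-- from typing import List, Tuple
--
-- def pick_items_with_mask(groups: List[List[str]], iteration: int) -> Tuple[List[str], int]:
--     # Radix-weight table: place[k] = product of lengths of all earlier groups.
--     places = []
--     p = 1
--     for group in groups:
--         places.append(p)
--         p *= len(group)
--     # Independent modular extraction per group.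
--     selected_items = []
--     for group, place in zip(groups, places):
--         selected_items.append(group[(iteration // place) % len(group)])
--     return selected_items, iteration
-- ===== Notes on version B (the rewrite author's own statement) =====
-- stated objective: alternative
-- what changed: Replaces the single loop that threads a running quotient (binmask %= / //= per group) with a two-pass scheme: first build an explicit radix-weight table place[k] = product of earlier group lengths, then compute each selection independently as group[(iteration // place[k]) % len(group[k])].
import Mathlib
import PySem

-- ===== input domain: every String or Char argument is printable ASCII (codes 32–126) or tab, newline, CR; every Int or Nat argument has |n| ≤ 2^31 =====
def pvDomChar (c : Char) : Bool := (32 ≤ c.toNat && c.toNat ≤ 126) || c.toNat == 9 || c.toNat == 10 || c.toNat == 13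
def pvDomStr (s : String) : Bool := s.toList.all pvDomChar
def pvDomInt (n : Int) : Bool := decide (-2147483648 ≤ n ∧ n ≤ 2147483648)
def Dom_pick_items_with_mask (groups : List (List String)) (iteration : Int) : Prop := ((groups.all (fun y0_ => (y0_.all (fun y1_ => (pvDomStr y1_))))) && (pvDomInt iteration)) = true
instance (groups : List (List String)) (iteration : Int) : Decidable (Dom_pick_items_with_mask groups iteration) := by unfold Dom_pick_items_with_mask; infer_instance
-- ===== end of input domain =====

-- ===== PORT A =====
-- B replaces A's threaded running-quotient with a radix-weight table plus independent modular
-- extractions (objective: alternative decomposition, same cost).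
def pick_items_with_mask (groups : List (List String)) (iteration : Int) : List String × Int :=
  let st := groups.foldl
    (fun (acc : List String × Int) group =>
      let num_options : Int := (group.length : Int)
      let selected_index := PySem.Int.mod acc.2 num_options
      (acc.1 ++ [PySem.List.pyGetD group selected_index ""],
       PySem.Int.floordiv acc.2 num_options))
    ([], iteration)
  (st.1, iteration)

-- ===== PORT B =====
def pick_items_with_mask_alt (groups : List (List String)) (iteration : Int) : List String × Int :=
  -- first pass: radix-weight table places[k] = product of lengths of earlier groups
  let places := (groups.foldl
    (fun (acc : List Int × Int) group =>
      (acc.1 ++ [acc.2], acc.2 * (group.length : Int)))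
    ([], 1)).1
  -- second pass: independent modular extraction per (group, place) pair
  let selected_items := (groups.zip places).foldl
    (fun (sel : List String) gp =>
      sel ++ [PySem.List.pyGetD gp.1
        (PySem.Int.mod (PySem.Int.floordiv iteration gp.2) (gp.1.length : Int)) ""])
    []
  (selected_items, iteration)

-- ===== PRECONDITION & SPEC =====
-- Pre_ excludes inputs containing an empty group: there Python's '% 0' raises ZeroDivisionError
-- in A (and in B alike), so no value is returned.
def Pre_pick_items_with_mask (groups : List (List String)) (iteration : Int) : Prop :=
  ∀ g ∈ groups, g ≠ []
instance (groups : List (List String)) (iteration : Int) : Decidable (Pre_pick_items_with_mask groups iteration) := by unfold Pre_pick_items_with_mask; infer_instance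
def pvWitness_pick_items_with_mask : List (List String) × Int := ([["a", "b"], ["x", "y", "z"]], 4)

def Spec_pick_items_with_mask (groups : List (List String)) (iteration : Int) (out : List String × Int) : Prop := out = pick_items_with_mask_alt groups iteration
instance (groups : List (List String)) (iteration : Int) (out : List String × Int) : Decidable (Spec_pick_items_with_mask groups iteration out) := by unfold Spec_pick_items_with_mask; infer_instance

-- ===== CLAIM (what is proved, stated in full; the proofs are below) =====
def Claim_equal_pick_items_with_mask : Prop := ∀ (groups : List (List String)) (iteration : Int), Dom_pick_items_with_mask groups iteration → Pre_pick_items_with_mask groups iteration → Spec_pick_items_with_mask groups iteration (pick_items_with_mask groups iteration)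

-- ===== LEMMAS AND PROOFS =====

-- recursive characterisation of A's selection loop
def selRecA (groups : List (List String)) (b : Int) : List String :=
  match groups with
  | [] => []
  | g :: gs =>
      PySem.List.pyGetD g (PySem.Int.mod b (g.length : Int)) "" ::
        selRecA gs (PySem.Int.floordiv b (g.length : Int))

-- recursive characterisation of B's places loop
def placesRec (groups : List (List String)) (p : Int) : List Int :=
  match groups with
  | [] => []
  | g :: gs => p :: placesRec gs (p * (g.length : Int))

theorem foldA_eq (groups : List (List String)) (acc : List String) (b : Int) :
    (groups.foldl
      (fun (acc : List String × Int) group =>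
        (acc.1 ++ [PySem.List.pyGetD group (PySem.Int.mod acc.2 (group.length : Int)) ""],
         PySem.Int.floordiv acc.2 (group.length : Int)))
      (acc, b)).1 = acc ++ selRecA groups b := by
  induction groups generalizing acc b with
  | nil => simp [selRecA]
  | cons g gs ih => simp [List.foldl, selRecA, ih]

theorem foldP_eq (groups : List (List String)) (acc : List Int) (p : Int) :
    (groups.foldl
      (fun (acc : List Int × Int) group =>
        (acc.1 ++ [acc.2], acc.2 * (group.length : Int)))
      (acc, p)).1 = acc ++ placesRec groups p := by
  induction groups generalizing acc p with
  | nil => simp [placesRec]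
  | cons g gs ih => simp [List.foldl, placesRec, ih]

theorem foldB_eq (zs : List (List String × Int)) (acc : List String) (iteration : Int) :
    zs.foldl
      (fun (sel : List String) gp =>
        sel ++ [PySem.List.pyGetD gp.1
          (PySem.Int.mod (PySem.Int.floordiv iteration gp.2) (gp.1.length : Int)) ""])
      acc
    = acc ++ zs.map (fun gp => PySem.List.pyGetD gp.1
        (PySem.Int.mod (PySem.Int.floordiv iteration gp.2) (gp.1.length : Int)) "") := by
  induction zs generalizing acc with
  | nil => simp
  | cons z zs ih => simp [List.foldl, ih]

theorem floordiv_floordiv (i p n : Int) (hp : 0 < p) (hn : 0 < n) :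
    PySem.Int.floordiv (PySem.Int.floordiv i p) n = PySem.Int.floordiv i (p * n) := by
  have h : ∀ (a b : Int), 0 < b → PySem.Int.floordiv a b = Int.fdiv a b := by
    intro a b hb; simp [PySem.Int.floordiv]
  rw [h _ _ hp, h _ _ hn, h _ _ (by positivity)]
  exact Int.fdiv_fdiv_eq_fdiv_mul i (le_of_lt hp) (le_of_lt hn)

theorem main_lemma (groups : List (List String)) (i p : Int) (hp : 0 < p)
    (h : ∀ g ∈ groups, g ≠ []) :
    selRecA groups (PySem.Int.floordiv i p)
      = (groups.zip (placesRec groups p)).map (fun gp => PySem.List.pyGetD gp.1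
          (PySem.Int.mod (PySem.Int.floordiv i gp.2) (gp.1.length : Int)) "") := by
  induction groups generalizing p with
  | nil => simp [selRecA, placesRec]
  | cons g gs ih =>
      have hg : g ≠ [] := h g (by simp)
      have hn : (0 : Int) < (g.length : Int) := by
        have : g.length ≠ 0 := by simpa using hg
        omega
      simp only [selRecA, placesRec, List.zip_cons_cons, List.map_cons]
      refine congrArg₂ _ rfl ?_
      rw [floordiv_floordiv i p (g.length : Int) hp hn]
      exact ih (p * (g.length : Int)) (by positivity) (fun g' hg' => h g' (by simp [hg']))

theorem floordiv_one (i : Int) : PySem.Int.floordiv i 1 = i := by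
  simp [PySem.Int.floordiv]

-- ===== VERDICT (by name: the statement is the Claim_ definition above) =====
theorem pick_items_with_mask_spec : Claim_equal_pick_items_with_mask := by
  intro groups iteration _ hpre
  unfold Spec_pick_items_with_mask pick_items_with_mask pick_items_with_mask_alt
  simp only [foldA_eq, foldP_eq, foldB_eq, List.nil_append]
  refine congrArg₂ _ ?_ rfl
  have := main_lemma groups iteration 1 (by norm_num) hpre
  rw [floordiv_one] at this
  exact this
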